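-- pv_equiv track=rewrite | github.com/Kayofpimentel/blockchain-exercise | blockchain.py | verify_chain_is_safe
-- ===== SOURCE A (Python) =====
-- def verify_chain_is_safe(the_chain, counter=0, is_safe=True):
--     if len(the_chain) > counter+1:
--         if the_chain[counter] in the_chain[counter+1]:
--             counter += 1
--             return verify_chain_is_safe(the_chain, counter)
--         else:
--             return False
--     else:
--         return is_safe
-- ===== SOURCE B (Python) =====
-- def verify_chain_is_safe(the_chain, counter=0, is_safe=True):
--     if len(the_chain) <= counter + 1:
--         return is_safe
--     for i in range(counter, len(the_chain) - 1):
--         if the_chain[i] not in the_chain[i + 1]: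
--             return False
--     return True
-- ===== Notes on version B (the rewrite author's own statement) =====
-- stated objective: idiomatic
-- what changed: Replaces A's tail recursion (which rebuilds the call each step and re-slices the guard) with a single forward for-loop over range(counter, len-1) that returns False on the first block not contained in its successor; the is_safe parameter is returned only on the degenerate no-iteration case, matching A's recursion resetting is_safe to True.
-- outside the precondition, e.g. on verify_chain_is_safe(['a', 'b', 'c'], -5, True): A raises IndexError, B raises IndexError
import Mathlib
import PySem

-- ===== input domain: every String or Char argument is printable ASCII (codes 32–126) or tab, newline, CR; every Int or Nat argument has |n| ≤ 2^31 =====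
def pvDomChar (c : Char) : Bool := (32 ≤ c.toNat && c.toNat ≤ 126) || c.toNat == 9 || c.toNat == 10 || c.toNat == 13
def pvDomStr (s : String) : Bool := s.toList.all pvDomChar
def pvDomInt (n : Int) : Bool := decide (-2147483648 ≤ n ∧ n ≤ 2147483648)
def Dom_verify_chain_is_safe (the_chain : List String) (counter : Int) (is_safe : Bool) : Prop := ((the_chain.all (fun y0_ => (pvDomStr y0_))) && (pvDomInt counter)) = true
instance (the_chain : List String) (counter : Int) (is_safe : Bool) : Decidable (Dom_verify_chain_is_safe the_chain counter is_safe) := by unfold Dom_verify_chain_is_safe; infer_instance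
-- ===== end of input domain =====

-- B replaces A's tail recursion with an idiomatic forward scan returning False at the
-- first block not contained in its successor (same values; no speed claim).


-- ===== PORT A =====
def verify_chain_is_safe (the_chain : List String) (counter : Int) (is_safe : Bool) : Bool :=
  if h : (the_chain.length : Int) > counter + 1 then
    match PySem.List.pyGet? the_chain counter, PySem.List.pyGet? the_chain (counter + 1) with
    | some a, some b =>
        if PySem.Str.isIn a b then
          verify_chain_is_safe the_chain (counter + 1) true
        else
          false
    | _, _ => false      -- IndexError in Python; excluded by Pre_
  else
    is_safe
termination_by ((the_chain.length : Int) - counter).toNat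
decreasing_by omega

-- ===== PORT B =====
-- the loop body's test: the_chain[i] in the_chain[i+1]
def vcsCheck (the_chain : List String) (i : Int) : Bool :=
  -- indexing out of range is an IndexError in Python (excluded by Pre_): false here
  ((PySem.List.pyGet? the_chain i).bind fun a =>
    (PySem.List.pyGet? the_chain (i + 1)).map fun b =>
      PySem.Str.isIn a b).getD false

def verify_chain_is_safe_alt (the_chain : List String) (counter : Int) (is_safe : Bool) : Bool :=
  if (the_chain.length : Int) ≤ counter + 1 then
    is_safe
  else
    (PySem.List.pyRange counter ((the_chain.length : Int) - 1) 1).all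
      (fun i => vcsCheck the_chain i)

-- ===== PRECONDITION & SPEC =====
-- Pre_ excludes exactly the inputs where Python A raises IndexError: counter below -len
-- while the length guard still fires (B raises there too).
def Pre_verify_chain_is_safe (the_chain : List String) (counter : Int) (is_safe : Bool) : Prop :=
  (the_chain.length : Int) > counter + 1 → -(the_chain.length : Int) ≤ counter
instance (the_chain : List String) (counter : Int) (is_safe : Bool) : Decidable (Pre_verify_chain_is_safe the_chain counter is_safe) := by unfold Pre_verify_chain_is_safe; infer_instance

def pvWitness_verify_chain_is_safe : List String × Int × Bool := (["a", "ab", "abc"], 0, true)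

def Spec_verify_chain_is_safe (the_chain : List String) (counter : Int) (is_safe : Bool) (out : Bool) : Prop := out = verify_chain_is_safe_alt the_chain counter is_safe
instance (the_chain : List String) (counter : Int) (is_safe : Bool) (out : Bool) : Decidable (Spec_verify_chain_is_safe the_chain counter is_safe out) := by unfold Spec_verify_chain_is_safe; infer_instance

-- ===== CLAIM (what is proved, stated in full; the proofs are below) =====
def Claim_equal_verify_chain_is_safe : Prop := ∀ (the_chain : List String) (counter : Int) (is_safe : Bool), Dom_verify_chain_is_safe the_chain counter is_safe → Pre_verify_chain_is_safe the_chain counter is_safe → Spec_verify_chain_is_safe the_chain counter is_safe (verify_chain_is_safe the_chain counter is_safe)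

-- ===== LEMMAS AND PROOFS =====

-- With is_safe = true, B is just the scan: the guard case contributes an empty range.
lemma alt_true (the_chain : List String) (c : Int) :
    verify_chain_is_safe_alt the_chain c true
      = (PySem.List.pyRange c ((the_chain.length : Int) - 1) 1).all
          (fun i => vcsCheck the_chain i) := by
  unfold verify_chain_is_safe_alt
  split_ifs with h
  · rw [PySem.List.pyRange_one_eq_nil (by omega)]
    rfl
  · rfl

lemma main_lemma (the_chain : List String) :
    ∀ (n : Nat) (counter : Int) (is_safe : Bool),
      n = ((the_chain.length : Int) - counter).toNat →
      Pre_verify_chain_is_safe the_chain counter is_safe →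
      verify_chain_is_safe the_chain counter is_safe
        = verify_chain_is_safe_alt the_chain counter is_safe := by
  intro n
  induction n using Nat.strong_induction_on with
  | _ n ih =>
    intro counter is_safe hn hpre
    unfold verify_chain_is_safe verify_chain_is_safe_alt
    split_ifs with hg hle hle2
    · omega
    · -- guard fires: both indices are in range
      have hlo : -(the_chain.length : Int) ≤ counter := hpre hg
      have h1 : PySem.List.pyGet? the_chain counter ≠ none := by
        simp only [ne_eq, PySem.List.pyGet?_eq_none_iff, PySem.Raise.InRange]; omega
      have h2 : PySem.List.pyGet? the_chain (counter + 1) ≠ none := by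
        simp only [ne_eq, PySem.List.pyGet?_eq_none_iff, PySem.Raise.InRange]; omega
      obtain ⟨a, ha⟩ := Option.ne_none_iff_exists'.mp h1
      obtain ⟨b, hb⟩ := Option.ne_none_iff_exists'.mp h2
      rw [ha, hb]
      rw [PySem.List.pyRange_one_cons (by omega)]
      simp only [List.all_cons]
      have hcheck : vcsCheck the_chain counter = PySem.Str.isIn a b := by
        unfold vcsCheck; rw [ha, hb]; rfl
      rw [hcheck]
      by_cases hin : PySem.Str.isIn a b = true
      · rw [hin]
        have := ih (((the_chain.length : Int) - (counter + 1)).toNat) (by omega)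
          (counter + 1) true rfl (by intro _; omega)
        rw [this, alt_true]
        simp
      · rw [Bool.eq_false_iff.mpr hin]
        simp
    · rfl
    · omega

-- ===== VERDICT (by name: the statement is the Claim_ definition above) =====
theorem verify_chain_is_safe_spec : Claim_equal_verify_chain_is_safe := by
  intro the_chain counter is_safe _ hpre
  unfold Spec_verify_chain_is_safe
  exact main_lemma the_chain _ counter is_safe rfl hpre
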